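-- pv_equiv track=rewrite | github.com/fanzhangg/algorithm-problems | recursion/sum_after.py | sum_after
-- ===== SOURCE A (Python) =====
-- def sum_after(nums: list, pos=0):
--     if pos < 0:
--         pos = 0
--     if pos > len(nums) - 1:
--         return 0
--     if pos == len(nums) - 1:
--         return nums[pos]
--     else:
--         return nums[pos] + sum_after(nums, pos+1)
-- ===== SOURCE B (Python) =====
-- def sum_after(nums: list, pos=0):
--     if pos < 0:
--         pos = 0
--     s = nums[pos:]
--     if not s:
--         return 0
--     total = s[0]
--     for x in s[1:]:
--         total += x
--     return total
-- ===== Notes on version B (the rewrite author's own statement) =====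
-- stated objective: simpler
-- what changed: Replaces A's linear recursion with an iterative fold over the slice nums[pos:], seeded from its first element.
import Mathlib
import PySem

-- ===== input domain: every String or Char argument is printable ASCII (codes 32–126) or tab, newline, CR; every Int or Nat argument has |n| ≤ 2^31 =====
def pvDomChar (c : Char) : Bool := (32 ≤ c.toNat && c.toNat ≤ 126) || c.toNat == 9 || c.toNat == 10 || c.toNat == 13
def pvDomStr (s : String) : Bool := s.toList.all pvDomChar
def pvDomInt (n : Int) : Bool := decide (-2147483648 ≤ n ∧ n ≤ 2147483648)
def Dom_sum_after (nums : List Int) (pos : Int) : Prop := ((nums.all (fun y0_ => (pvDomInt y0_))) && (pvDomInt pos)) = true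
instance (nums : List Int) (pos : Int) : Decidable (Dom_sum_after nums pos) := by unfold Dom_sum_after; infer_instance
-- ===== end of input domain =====

-- B replaces A's linear recursion with an iterative fold over the slice nums[pos:], seeded from its first element (simpler, same cost).


-- ===== PORT A =====
-- faithful port of A's recursion; nums[pos] is in range at both uses (proved in-range, .getD 0 never fires)
def sum_after (nums : List Int) (pos : Int) : Int :=
  let p := if pos < 0 then 0 else pos
  if p > (nums.length : Int) - 1 then 0
  else if p = (nums.length : Int) - 1 then (PySem.List.pyGet? nums p).getD 0
  else (PySem.List.pyGet? nums p).getD 0 + sum_after nums (p + 1)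
termination_by nums.length - pos.toNat
decreasing_by
  simp only [p] at *
  split_ifs at * <;> omega

-- ===== PORT B =====
-- port of B: clamp, slice, seed the fold from the head
def sum_after_alt (nums : List Int) (pos : Int) : Int :=
  match PySem.List.slice nums (some (if pos < 0 then 0 else pos)) none with
  | [] => 0
  | h :: t => t.foldl (fun total x => total + x) h

-- ===== PRECONDITION & SPEC =====
def Spec_sum_after (nums : List Int) (pos : Int) (out : Int) : Prop := out = sum_after_alt nums pos
instance (nums : List Int) (pos : Int) (out : Int) : Decidable (Spec_sum_after nums pos out) := by unfold Spec_sum_after; infer_instance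

-- ===== CLAIM (what is proved, stated in full; the proofs are below) =====
def Claim_equal_sum_after : Prop := ∀ (nums : List Int) (pos : Int), Dom_sum_after nums pos → Spec_sum_after nums pos (sum_after nums pos)

-- ===== LEMMAS AND PROOFS =====

theorem foldl_add_sum (l : List Int) (init : Int) :
    l.foldl (fun total x => total + x) init = init + l.sum := by
  induction l generalizing init with
  | nil => simp
  | cons a t ih => simp [List.foldl, ih]; ring

theorem sum_after_eq_sum_drop (nums : List Int) (pos : Int) :
    sum_after nums pos = (nums.drop pos.toNat).sum := by
  rw [sum_after]
  set p := if pos < 0 then 0 else pos with hp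
  have hp0 : 0 ≤ p := by rw [hp]; split_ifs <;> omega
  have hpt : p.toNat = pos.toNat := by rw [hp]; split_ifs <;> omega
  split_ifs with h1 h2
  · rw [List.drop_eq_nil_of_le (by omega)]; rfl
  · have hlen : 1 ≤ nums.length := by omega
    have hlt : pos.toNat < nums.length := by omega
    rw [show p = ((p.toNat : Nat) : Int) by omega, PySem.List.pyGet?_natCast]
    have hd : nums.drop pos.toNat = [nums[pos.toNat]] := by
      rw [List.drop_eq_getElem_cons hlt, List.drop_eq_nil_of_le (by omega)]
    rw [hpt, hd]
    simp [List.getElem?_eq_getElem hlt]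
  · have hlt : pos.toNat < nums.length - 1 := by omega
    rw [sum_after_eq_sum_drop nums (p + 1)]
    rw [show p = ((p.toNat : Nat) : Int) by omega, PySem.List.pyGet?_natCast]
    have h1n : (((p.toNat : Nat) : Int) + 1).toNat = pos.toNat + 1 := by omega
    rw [h1n, hpt]
    conv_rhs => rw [List.drop_eq_getElem_cons (show pos.toNat < nums.length by omega)]
    rw [List.sum_cons]
    simp [List.getElem?_eq_getElem (show pos.toNat < nums.length by omega)]
termination_by nums.length - pos.toNat
decreasing_by omega

theorem sum_after_alt_eq_sum_drop (nums : List Int) (pos : Int) :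
    sum_after_alt nums pos = (nums.drop pos.toNat).sum := by
  unfold sum_after_alt
  have hcl : (if pos < 0 then 0 else pos) = ((pos.toNat : Nat) : Int) := by
    split_ifs <;> omega
  rw [hcl, PySem.List.slice_from_natCast]
  rcases h : nums.drop pos.toNat with _ | ⟨h0, t⟩ <;> simp [foldl_add_sum]

-- ===== VERDICT (by name: the statement is the Claim_ definition above) =====
theorem sum_after_spec : Claim_equal_sum_after := by
  intro nums pos _
  unfold Spec_sum_after
  rw [sum_after_eq_sum_drop, sum_after_alt_eq_sum_drop]
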